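-- pv_equiv track=rewrite | github.com/VladKha/HackerRank | Python/Sets/No Idea!/solve.py | solve
-- ===== SOURCE A (Python) =====
-- def solve(arr, set1, set2):
--     result = 0
--
--     for e in arr:
--         if e in set1:
--             result += 1
--
--     for e in arr:
--         if e in set2:
--             result -= 1
--
--     return result
-- ===== SOURCE B (Python) =====
-- def solve(arr, set1, set2):
--     cnt = {}
--     for e in arr:
--         cnt[e] = cnt.get(e, 0) + 1
--     total = 0
--     for x in dict.fromkeys(set1):
--         total += cnt.get(x, 0)
--     for x in dict.fromkeys(set2):
--         total -= cnt.get(x, 0)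
--     return total
-- ===== Notes on version B (the rewrite author's own statement) =====
-- stated objective: alternative
-- what changed: B builds a frequency dict of arr in one pass and then lets the deduplicated sets drive the loops (summing stored counts), instead of scanning arr twice with a membership test on each element; it trades the per-element membership tests for a prebuilt count table.
import Mathlib
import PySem

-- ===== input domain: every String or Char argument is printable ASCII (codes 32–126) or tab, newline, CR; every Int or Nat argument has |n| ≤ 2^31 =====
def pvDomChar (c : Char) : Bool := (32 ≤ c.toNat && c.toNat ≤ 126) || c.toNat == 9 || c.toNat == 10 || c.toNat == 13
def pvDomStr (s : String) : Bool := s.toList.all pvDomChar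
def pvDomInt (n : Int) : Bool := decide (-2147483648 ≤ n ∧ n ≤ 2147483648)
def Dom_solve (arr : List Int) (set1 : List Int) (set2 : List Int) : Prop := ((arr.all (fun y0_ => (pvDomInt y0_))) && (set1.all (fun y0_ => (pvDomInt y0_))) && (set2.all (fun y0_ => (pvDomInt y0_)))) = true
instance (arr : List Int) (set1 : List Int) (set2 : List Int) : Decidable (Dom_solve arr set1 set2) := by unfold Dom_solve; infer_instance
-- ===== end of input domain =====

-- B replaces A's two membership-scanning passes over arr with one frequency dict of arr,
-- summing stored counts over the deduplicated sets (a different traversal of the same data).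


-- ===== PORT A =====
def solve (arr : List Int) (set1 : List Int) (set2 : List Int) : Int :=
  let result : Int := 0
  let result := arr.foldl (fun result e => if set1.contains e then result + 1 else result) result
  let result := arr.foldl (fun result e => if set2.contains e then result - 1 else result) result
  result

-- ===== PORT B =====
def solve_alt (arr : List Int) (set1 : List Int) (set2 : List Int) : Int :=
  let cnt := arr.foldl (fun d e => d.insert e (d.getD e 0 + 1)) (PySem.Dict.empty : PySem.Dict Int Int)
  let total : Int := 0
  let total := (PySem.List.dedup set1).foldl (fun total x => total + cnt.getD x 0) total
  let total := (PySem.List.dedup set2).foldl (fun total x => total - cnt.getD x 0) total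
  total

-- ===== PRECONDITION & SPEC =====
def Spec_solve (arr : List Int) (set1 : List Int) (set2 : List Int) (out : Int) : Prop := out = solve_alt arr set1 set2
instance (arr : List Int) (set1 : List Int) (set2 : List Int) (out : Int) : Decidable (Spec_solve arr set1 set2 out) := by unfold Spec_solve; infer_instance

-- ===== CLAIM (what is proved, stated in full; the proofs are below) =====
def Claim_equal_solve : Prop := ∀ (arr : List Int) (set1 : List Int) (set2 : List Int), Dom_solve arr set1 set2 → Spec_solve arr set1 set2 (solve arr set1 set2)

-- ===== LEMMAS AND PROOFS =====

-- A's counting pass equals the length of the membership filter.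
theorem foldl_count_mem (arr s : List Int) (c : Int) :
    arr.foldl (fun acc e => if s.contains e then acc + 1 else acc) c
      = c + ((arr.filter (fun e => s.contains e)).length : Int) := by
  induction arr generalizing c with
  | nil => simp
  | cons a t ih =>
    simp only [List.foldl_cons, List.filter_cons]
    by_cases h : s.contains a = true
    · rw [if_pos h, if_pos h, ih]; simp only [List.length_cons]; push_cast; ring
    · rw [if_neg h, if_neg h, ih]

theorem foldl_count_mem_sub (arr s : List Int) (c : Int) :
    arr.foldl (fun acc e => if s.contains e then acc - 1 else acc) c
      = c - ((arr.filter (fun e => s.contains e)).length : Int) := by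
  induction arr generalizing c with
  | nil => simp
  | cons a t ih =>
    simp only [List.foldl_cons, List.filter_cons]
    by_cases h : s.contains a = true
    · rw [if_pos h, if_pos h, ih]; simp only [List.length_cons]; push_cast; ring
    · rw [if_neg h, if_neg h, ih]

theorem sum_indicator (ds : List Int) (a : Int) (h : ds.Nodup) :
    (ds.map (fun x => if a = x then (1 : Int) else 0)).sum
      = if a ∈ ds then 1 else 0 := by
  induction ds with
  | nil => simp
  | cons d t ih =>
    simp only [List.nodup_cons] at h
    by_cases hd : a = d
    · subst hd
      have hz : (t.map (fun x => if a = x then (1:Int) else 0)).sum = 0 := by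
        apply List.sum_eq_zero; intro x hx
        rcases List.mem_map.1 hx with ⟨y, hy, rfl⟩
        have hne : a ≠ y := fun e => h.1 (e ▸ hy)
        simp [hne]
      simp [hz]
    · simp [hd, ih h.2, List.mem_cons]

-- Sum of counts over a nodup enumeration of s's elements = length of the membership filter.
theorem sum_counts_eq_filter_length (arr : List Int) (s ds : List Int)
    (hnd : ds.Nodup) (hmem : ∀ x, x ∈ ds ↔ x ∈ s) :
    (ds.map (fun x => (arr.count x : Int))).sum
      = ((arr.filter (fun e => s.contains e)).length : Int) := by
  induction arr with
  | nil => simp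
  | cons a t ih =>
    have hcnt : ∀ x : Int, ((a :: t).count x : Int)
        = (t.count x : Int) + (if x = a then 1 else 0) := by
      intro x; by_cases hx : x = a
      · subst hx; simp
      · simp [hx, show a ≠ x from fun e => hx e.symm]
    have hmap : ds.map (fun x => ((a :: t).count x : Int))
        = ds.map (fun x => (t.count x : Int) + (if x = a then 1 else 0)) := by
      exact List.map_congr_left (fun x _ => hcnt x)
    rw [hmap, List.sum_map_add]
    have hind : (ds.map (fun x => if x = a then (1:Int) else 0)).sum
        = if a ∈ ds then 1 else 0 := by
      have := sum_indicator ds a hnd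
      simpa [eq_comm] using this
    rw [ih, hind, List.filter_cons]
    by_cases hin : a ∈ s
    · have h1 : s.contains a = true := by simpa using hin
      rw [if_pos h1, if_pos ((hmem a).2 hin)]
      simp only [List.length_cons]; push_cast; ring
    · have h1 : ¬ s.contains a = true := by simpa using hin
      rw [if_neg h1, if_neg (fun h => hin ((hmem a).1 h))]
      simp

theorem foldl_sub_eq (ds : List Int) (g : Int → Int) (c : Int) :
    ds.foldl (fun acc x => acc - g x) c = c - (ds.map g).sum := by
  induction ds generalizing c with
  | nil => simp
  | cons d t ih => simp [ih]; ring

-- ===== VERDICT (by name: the statement is the Claim_ definition above) =====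
theorem solve_spec : Claim_equal_solve := by
  intro arr set1 set2 _
  show solve arr set1 set2 = solve_alt arr set1 set2
  unfold solve solve_alt
  rw [PySem.Dict.foldl_insert_getD_add_one_eq_counter]
  simp only [foldl_count_mem, foldl_count_mem_sub,
    PySem.List.foldl_add, foldl_sub_eq, PySem.Dict.getD_counter]
  rw [← sum_counts_eq_filter_length arr set1 (PySem.List.dedup set1)
        (PySem.List.nodup_dedup set1) (fun x => PySem.List.mem_dedup set1 x),
      ← sum_counts_eq_filter_length arr set2 (PySem.List.dedup set2)
        (PySem.List.nodup_dedup set2) (fun x => PySem.List.mem_dedup set2 x)]
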